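-- pv_equiv track=rewrite | github.com/finn-okeeffe/the_doctors_kitchen_project | equipment_parser.py | equipment_set
-- ===== SOURCE A (Python) =====
-- from typing import List, Tuple, Set
--
-- equipment_dict = {
--     "pan": {"pan", "frypan"},
--     "pot": {"pot", "boil", "saucepan"},
--     "blender": {"blend"},
--     "air fryer": {"air frier", "air fryer"},
--     "toaster": {"toaster", "toast"},
--     "oven": {"oven", "bake", "roast"},
--     "cast-iron pan": {"cast iron pan"},
--     "knife": {"slice", "sliced", "chop", "chopped", "dice", "diced", "cube", "cubed"},
--     "chopping board": {"slice", "sliced", "chop", "chopped", "dice", "diced", "cube", "cubed", "board"},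
--     "measuring spoons": {"tbsp", "tsp"},
--     "measuring cup": {"cup", "cups", "ml"},
--     "scale": {"g", "gram", "grams"},
--     "bowl": {"bowl"},
--     "baking paper": {"baking paper", "baking parchment"},
--     "fridge": {"fridge", "refridgerator"},
--     "freezer": {"freezer", "freeze"},
--     "microwave": {"microwave"}
-- }
--
-- character_replacement_dict = {
--     "-": " "
-- }
--
-- def equipment_set(method: List[str], ingredient_strings: List[str]) -> List[str]:
--     words = method_words_list(method)
--
--     equipment_set_object = set()
--     for equipment, phrases in equipment_dict.items():
--
--         for phrase in phrases:
--             if phrase_in_str_list(phrase,words) or phrase_in_ingredients(phrase, ingredient_strings):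
--                 equipment_set_object.add(equipment)
--                 break
--
--     return equipment_set_object
--
-- def string_to_standard_string(string: str) -> str:
--     string = [character_replacement_dict[c] if c in character_replacement_dict else c for c in string]
--     string = ''.join([c.lower() for c in string if c.isalnum() or c.isspace()])
--     return string
--
-- def method_alnum_string_from_list(method: List[str]) -> str:
--     method_alnum = []
--     for step in method:
--         method_alnum.append(string_to_standard_string(step))
--
--     method_alnum_string = ' '.join(method_alnum)
--     return method_alnum_string
--
-- def method_words_list(method: List[str]) -> List[str]:
--     method_string = method_alnum_string_from_list(method)
--     return list(method_string.split())
--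
-- def phrase_in_str_list(phrase: str, str_list: List[str]) -> bool:
--     phrase_list = phrase.split()
--     l = len(phrase_list)
--     for i in range(len(str_list)-l+1):
--         if str_list[i:i+l] == phrase_list:
--             return True
--     return False
--
-- def phrase_in_ingredients(phrase: str, ingredients_string_list: List[str]) -> bool:
--     split_set: Set[str] = set()
--     for s in ingredients_string_list:
--         for word in s.split():
--             split_set.add(word)
--
--     return phrase in split_set
-- ===== SOURCE B (Python) =====
-- # Alternative implementation: one normalization pass, a precomputed inverted
-- # phrase->equipment map, and an n-gram "present phrases" set with O(1) lookups
-- # instead of A's per-phrase window scans and per-phrase ingredient-set rebuilds.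
-- equipment_dict = {
--     "pan": {"pan", "frypan"},
--     "pot": {"pot", "boil", "saucepan"},
--     "blender": {"blend"},
--     "air fryer": {"air frier", "air fryer"},
--     "toaster": {"toaster", "toast"},
--     "oven": {"oven", "bake", "roast"},
--     "cast-iron pan": {"cast iron pan"},
--     "knife": {"slice", "sliced", "chop", "chopped", "dice", "diced", "cube", "cubed"},
--     "chopping board": {"slice", "sliced", "chop", "chopped", "dice", "diced", "cube", "cubed", "board"},
--     "measuring spoons": {"tbsp", "tsp"},
--     "measuring cup": {"cup", "cups", "ml"},
--     "scale": {"g", "gram", "grams"},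
--     "bowl": {"bowl"},
--     "baking paper": {"baking paper", "baking parchment"},
--     "fridge": {"fridge", "refridgerator"},
--     "freezer": {"freezer", "freeze"},
--     "microwave": {"microwave"}
-- }
--
-- # inverted map: phrase (as a tuple of its words) -> all equipment it signals
-- _INVERTED = {}
-- for _equipment, _phrases in equipment_dict.items():
--     for _phrase in _phrases:
--         _INVERTED.setdefault(tuple(_phrase.split()), []).append(_equipment)
--
--
-- def equipment_set(method, ingredient_strings):
--     # normalize the method text exactly once
--     text = ' '.join(
--         ''.join((' ' if c == '-' else c.lower())
--                 for c in step
--                 if c == '-' or c.isalnum() or c.isspace())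
--         for step in method)
--     words = text.split()
--
--     # every phrase that is present: 1-,2-,3-grams of the method words,
--     # plus the raw ingredient words (as 1-tuples)
--     present = set()
--     for n in (1, 2, 3):
--         for i in range(len(words) - n + 1):
--             present.add(tuple(words[i:i + n]))
--     for s in ingredient_strings:
--         for w in s.split():
--             present.add((w,))
--
--     hits = set()
--     for key, equipments in _INVERTED.items():
--         if key in present:
--             hits.update(equipments)
--
--     return {equipment for equipment in equipment_dict if equipment in hits}
-- ===== Notes on version B (the rewrite author's own statement) =====
-- stated objective: faster
-- what changed: B normalizes the method text once, precomputes a module-level inverted phrase->equipment map keyed by word tuples, and builds one set of present phrases (1/2/3-grams of the method words plus raw ingredient words) queried by O(1) membership, instead of A's per-phrase window scans over the method words and per-phrase rebuild of the whole ingredient word set.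
import Mathlib
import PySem

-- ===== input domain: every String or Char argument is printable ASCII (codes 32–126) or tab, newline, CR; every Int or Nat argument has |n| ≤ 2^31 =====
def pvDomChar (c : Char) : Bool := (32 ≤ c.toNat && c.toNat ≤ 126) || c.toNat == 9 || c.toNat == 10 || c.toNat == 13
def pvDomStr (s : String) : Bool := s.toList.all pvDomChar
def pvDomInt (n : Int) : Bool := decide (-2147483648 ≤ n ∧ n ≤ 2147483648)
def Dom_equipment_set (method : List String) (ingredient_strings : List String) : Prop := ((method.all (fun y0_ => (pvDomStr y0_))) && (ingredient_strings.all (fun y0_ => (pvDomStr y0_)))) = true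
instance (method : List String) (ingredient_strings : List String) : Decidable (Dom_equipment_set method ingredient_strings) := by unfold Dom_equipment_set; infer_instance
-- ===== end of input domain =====

-- B replaces A's per-phrase window scans and per-phrase ingredient-set rebuilds by one
-- normalization pass, a precomputed inverted phrase→equipment map and an n-gram
-- "present phrases" set queried by membership (objective: faster; measured).
-- Both programs return a Python set; the proved list equality is in the dict's key order.

-- shared module constant (equipment_dict; the phrase sets as lists of their distinct elements)
def pvEquipmentDict : List (String × List String) := [
  ("pan", ["pan", "frypan"]),
  ("pot", ["pot", "boil", "saucepan"]),
  ("blender", ["blend"]),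
  ("air fryer", ["air frier", "air fryer"]),
  ("toaster", ["toaster", "toast"]),
  ("oven", ["oven", "bake", "roast"]),
  ("cast-iron pan", ["cast iron pan"]),
  ("knife", ["slice", "sliced", "chop", "chopped", "dice", "diced", "cube", "cubed"]),
  ("chopping board", ["slice", "sliced", "chop", "chopped", "dice", "diced", "cube", "cubed", "board"]),
  ("measuring spoons", ["tbsp", "tsp"]),
  ("measuring cup", ["cup", "cups", "ml"]),
  ("scale", ["g", "gram", "grams"]),
  ("bowl", ["bowl"]),
  ("baking paper", ["baking paper", "baking parchment"]),
  ("fridge", ["fridge", "refridgerator"]),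
  ("freezer", ["freezer", "freeze"]),
  ("microwave", ["microwave"])]

-- ===== PORT A =====
-- string_to_standard_string: replace '-' by ' ' (character_replacement_dict), keep alnum/space, lower
def pvStdString (s : List Char) : List Char :=
  ((s.map (fun c => if c = '-' then ' ' else c)).filter
      (fun c => PySem.Chars.isalnum c || PySem.Chars.isspace c)).map PySem.Chars.lowerChar

-- method_alnum_string_from_list: append-loop then ' '.join
def pvMethodAlnumString (method : List String) : List Char :=
  PySem.Chars.join [' '] (method.foldl (fun acc step => acc ++ [pvStdString step.toList]) [])

-- method_words_list
def pvMethodWordsList (method : List String) : List (List Char) :=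
  PySem.Chars.split₀ (pvMethodAlnumString method)

-- phrase_in_str_list: scan all windows of length len(phrase.split())
def pvPhraseInStrList (phrase : List Char) (strList : List (List Char)) : Bool :=
  let phraseList := PySem.Chars.split₀ phrase
  let l : Int := PySem.List.len phraseList
  (PySem.List.pyRange 0 (PySem.List.len strList - l + 1) 1).any
    (fun i => PySem.List.slice strList (some i) (some (i + l)) == phraseList)

-- phrase_in_ingredients: rebuild the set of raw ingredient words, then membership
def pvPhraseInIngredients (phrase : List Char) (ings : List String) : Bool :=
  let splitSet : PySem.Set (List Char) := ings.foldl (fun st s =>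
    (PySem.Chars.split₀ s.toList).foldl (fun st w => PySem.Set.add st w) st) PySem.Set.empty
  PySem.Set.contains splitSet phrase

-- equipment_set: for each equipment, add it on the first matching phrase (for/break = any)
def equipment_set (method : List String) (ingredient_strings : List String) : List String :=
  let words := pvMethodWordsList method
  pvEquipmentDict.foldl (fun st p =>
      if p.2.any (fun phrase =>
          pvPhraseInStrList phrase.toList words || pvPhraseInIngredients phrase.toList ingredient_strings)
      then PySem.Set.add st p.1 else st)
    PySem.Set.empty

-- ===== PORT B =====
-- module-level inverted map: phrase (as its word tuple) -> all equipment it signals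
-- (setdefault(k, []).append(e) = modify k [] (· ++ [e]))
def pvInverted : PySem.Dict (List (List Char)) (List String) :=
  pvEquipmentDict.foldl (fun d p =>
      p.2.foldl (fun d phrase =>
        PySem.Dict.modify d (PySem.Chars.split₀ phrase.toList) [] (· ++ [p.1])) d)
    PySem.Dict.empty

-- one-pass normalization of a method step (filter then map, as B's genexp)
def pvNormStep (step : String) : List Char :=
  (step.toList.filter (fun c => c = '-' || PySem.Chars.isalnum c || PySem.Chars.isspace c)).map
    (fun c => if c = '-' then ' ' else PySem.Chars.lowerChar c)

def pvAltWords (method : List String) : List (List Char) :=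
  PySem.Chars.split₀ (PySem.Chars.join [' '] (method.map pvNormStep))

-- all phrases that are present: 1-,2-,3-grams of the method words + raw ingredient words
def pvGrams (words : List (List Char)) : PySem.Set (List (List Char)) :=
  ([1, 2, 3] : List Int).foldl (fun pr n =>
      (PySem.List.pyRange 0 (PySem.List.len words - n + 1) 1).foldl
        (fun pr i => PySem.Set.add pr (PySem.List.slice words (some i) (some (i + n)))) pr)
    PySem.Set.empty

def pvPresent (words : List (List Char)) (ings : List String) : PySem.Set (List (List Char)) :=
  ings.foldl (fun pr s =>
    (PySem.Chars.split₀ s.toList).foldl (fun pr w => PySem.Set.add pr [w]) pr) (pvGrams words)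

def pvHits (present : PySem.Set (List (List Char))) : PySem.Set String :=
  (PySem.Dict.items pvInverted).foldl (fun h p =>
      if PySem.Set.contains present p.1 then PySem.Set.update h p.2 else h)
    PySem.Set.empty

def equipment_set_alt (method : List String) (ingredient_strings : List String) : List String :=
  let words := pvAltWords method
  let present := pvPresent words ingredient_strings
  let hits := pvHits present
  (pvEquipmentDict.map Prod.fst).foldl (fun out e =>
      if PySem.Set.contains hits e then PySem.Set.add out e else out)
    PySem.Set.empty

-- ===== PRECONDITION & SPEC =====
def Spec_equipment_set (method : List String) (ingredient_strings : List String) (out : List String) : Prop := out = equipment_set_alt method ingredient_strings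
instance (method : List String) (ingredient_strings : List String) (out : List String) : Decidable (Spec_equipment_set method ingredient_strings out) := by unfold Spec_equipment_set; infer_instance

-- ===== CLAIM (what is proved, stated in full; the proofs are below) =====
def Claim_equal_equipment_set : Prop := ∀ (method : List String) (ingredient_strings : List String), Dom_equipment_set method ingredient_strings → Spec_equipment_set method ingredient_strings (equipment_set method ingredient_strings)

-- ===== LEMMAS AND PROOFS =====

-- pvInverted.items as a literal
def pvInvItems : List (List String × List String) := [
  (["pan"], ["pan"]),
  (["frypan"], ["pan"]),
  (["pot"], ["pot"]),
  (["boil"], ["pot"]),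
  (["saucepan"], ["pot"]),
  (["blend"], ["blender"]),
  (["air", "frier"], ["air fryer"]),
  (["air", "fryer"], ["air fryer"]),
  (["toaster"], ["toaster"]),
  (["toast"], ["toaster"]),
  (["oven"], ["oven"]),
  (["bake"], ["oven"]),
  (["roast"], ["oven"]),
  (["cast", "iron", "pan"], ["cast-iron pan"]),
  (["slice"], ["knife", "chopping board"]),
  (["sliced"], ["knife", "chopping board"]),
  (["chop"], ["knife", "chopping board"]),
  (["chopped"], ["knife", "chopping board"]),
  (["dice"], ["knife", "chopping board"]),
  (["diced"], ["knife", "chopping board"]),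
  (["cube"], ["knife", "chopping board"]),
  (["cubed"], ["knife", "chopping board"]),
  (["board"], ["chopping board"]),
  (["tbsp"], ["measuring spoons"]),
  (["tsp"], ["measuring spoons"]),
  (["cup"], ["measuring cup"]),
  (["cups"], ["measuring cup"]),
  (["ml"], ["measuring cup"]),
  (["g"], ["scale"]),
  (["gram"], ["scale"]),
  (["grams"], ["scale"]),
  (["bowl"], ["bowl"]),
  (["baking", "paper"], ["baking paper"]),
  (["baking", "parchment"], ["baking paper"]),
  (["fridge"], ["fridge"]),
  (["refridgerator"], ["fridge"]),
  (["freezer"], ["freezer"]),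
  (["freeze"], ["freezer"]),
  (["microwave"], ["microwave"])]

def pvInvItemsC : List (List (List Char) × List String) :=
  pvInvItems.map (fun p => (p.1.map String.toList, p.2))

set_option maxRecDepth 8192 in
lemma pvInverted_items_eq : PySem.Dict.items pvInverted = pvInvItemsC := by decide

-- words of split₀ contain no whitespace characters
lemma pv_split₀_go_no_space (s cur : List Char) (acc : List (List Char))
    (hcur : ∀ c ∈ cur, PySem.Chars.isspace c = false)
    (hacc : ∀ w ∈ acc, ∀ c ∈ w, PySem.Chars.isspace c = false) :
    ∀ w ∈ PySem.Chars.split₀.go s cur acc, ∀ c ∈ w, PySem.Chars.isspace c = false := by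
  induction s generalizing cur acc with
  | nil =>
    intro w hw
    simp only [PySem.Chars.split₀.go] at hw
    split at hw
    · exact hacc w (by simpa using hw)
    · simp only [List.mem_reverse, List.mem_cons] at hw
      rcases hw with h | h
      · intro c hc; subst h; exact hcur c (by simpa using hc)
      · exact hacc w h
  | cons b s ih =>
    intro w hw
    simp only [PySem.Chars.split₀.go] at hw
    by_cases hb : PySem.Chars.isspace b = true
    · rw [if_pos hb] at hw
      split at hw
      · exact ih [] acc (by simp) hacc w hw
      · refine ih [] _ (by simp) ?_ w hw
        intro v hv
        rcases List.mem_cons.mp hv with h | h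
        · intro c hc; subst h; exact hcur c (by simpa using hc)
        · exact hacc v h
    · rw [if_neg hb] at hw
      refine ih (b :: cur) acc ?_ hacc w hw
      intro c hc
      rcases List.mem_cons.mp hc with h | h
      · subst h; simpa using hb
      · exact hcur c h

lemma pv_split₀_no_space (s : List Char) :
    ∀ w ∈ PySem.Chars.split₀ s, ∀ c ∈ w, PySem.Chars.isspace c = false :=
  pv_split₀_go_no_space s [] [] (by simp) (by simp)

-- B's normalization equals A's
lemma pvNormStep_eq (s : String) : pvNormStep s = pvStdString s.toList := by
  unfold pvNormStep pvStdString
  rw [List.filter_map, List.map_map]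
  have h1 : (fun c => decide (c = '-') || PySem.Chars.isalnum c || PySem.Chars.isspace c) =
      ((fun c => PySem.Chars.isalnum c || PySem.Chars.isspace c) ∘ fun c => if c = '-' then ' ' else c) := by
    funext c
    by_cases h : c = '-'
    · subst h; decide
    · simp [Function.comp, h]
  have h2 : (fun c => if c = '-' then ' ' else PySem.Chars.lowerChar c) =
      (PySem.Chars.lowerChar ∘ fun c => if c = '-' then ' ' else c) := by
    funext c
    by_cases h : c = '-'
    · subst h; decide
    · simp [Function.comp, h]
  rw [h1, h2]

lemma pvAltWords_eq (method : List String) : pvAltWords method = pvMethodWordsList method := by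
  unfold pvAltWords pvMethodWordsList pvMethodAlnumString
  rw [PySem.List.foldl_append_singleton_eq_map]
  simp only [List.nil_append]
  congr 1
  congr 1
  exact List.map_congr_left (fun s _ => pvNormStep_eq s)

-- membership in a nested "for x: for y in g x: add (f y)" loop
lemma pv_mem_foldl_foldl_add {α β κ : Type} [BEq κ] [LawfulBEq κ]
    (l : List α) (g : α → List β) (f : β → κ) (s : PySem.Set κ) (k : κ) :
    (k ∈ l.foldl (fun st x => (g x).foldl (fun st y => PySem.Set.add st (f y)) st) s) ↔
      k ∈ s ∨ ∃ x ∈ l, ∃ y ∈ g x, k = f y := by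
  induction l generalizing s with
  | nil => simp
  | cons a l ih =>
    simp only [List.foldl_cons, ih, PySem.Set.mem_foldl_add, List.mem_cons]
    constructor
    · rintro ((h | h) | h)
      · exact Or.inl h
      · exact Or.inr ⟨a, Or.inl rfl, h⟩
      · rcases h with ⟨x, hx, hy⟩; exact Or.inr ⟨x, Or.inr hx, hy⟩
    · rintro (h | ⟨x, hx | hx, hy⟩)
      · exact Or.inl (Or.inl h)
      · subst hx; exact Or.inl (Or.inr hy)
      · exact Or.inr ⟨x, hx, hy⟩

lemma pvPhraseInIngredients_iff (phrase : List Char) (ings : List String) :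
    pvPhraseInIngredients phrase ings = true ↔
      ∃ s ∈ ings, phrase ∈ PySem.Chars.split₀ s.toList := by
  unfold pvPhraseInIngredients
  rw [PySem.Set.contains_iff]
  have h := pv_mem_foldl_foldl_add (κ := List Char) ings
    (fun s => PySem.Chars.split₀ s.toList) (fun w => w) PySem.Set.empty phrase
  simpa [PySem.Set.empty, eq_comm] using h

lemma pvPhraseInStrList_iff (phrase : List Char) (strList : List (List Char)) :
    pvPhraseInStrList phrase strList = true ↔
      ∃ i : Int, (0 ≤ i ∧ i < PySem.List.len strList - PySem.List.len (PySem.Chars.split₀ phrase) + 1) ∧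
        PySem.List.slice strList (some i) (some (i + PySem.List.len (PySem.Chars.split₀ phrase))) =
          PySem.Chars.split₀ phrase := by
  unfold pvPhraseInStrList
  simp only [List.any_eq_true, PySem.List.mem_pyRange_one, beq_iff_eq]

-- membership in the "present" set
lemma pv_mem_grams (words : List (List Char)) (k : List (List Char)) :
    k ∈ pvGrams words ↔
      ∃ n ∈ ([1, 2, 3] : List Int), ∃ i : Int,
        (0 ≤ i ∧ i < PySem.List.len words - n + 1) ∧
          k = PySem.List.slice words (some i) (some (i + n)) := by
  unfold pvGrams
  have step : ∀ (n : Int) (pr : PySem.Set (List (List Char))),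
      k ∈ (PySem.List.pyRange 0 (PySem.List.len words - n + 1) 1).foldl
            (fun pr i => PySem.Set.add pr (PySem.List.slice words (some i) (some (i + n)))) pr ↔
        k ∈ pr ∨ ∃ i : Int, (0 ≤ i ∧ i < PySem.List.len words - n + 1) ∧
            k = PySem.List.slice words (some i) (some (i + n)) := by
    intro n pr
    have h := PySem.Set.mem_foldl_add
      (f := fun i => PySem.List.slice words (some i) (some (i + n)))
      (l := PySem.List.pyRange 0 (PySem.List.len words - n + 1) 1) (s := pr) (y := k)
    simpa [PySem.List.mem_pyRange_one] using h
  simp only [List.foldl_cons, List.foldl_nil, step]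
  simp only [PySem.Set.empty]
  constructor
  · rintro (((h | h) | h) | h)
    · simp at h
    · exact ⟨1, by simp, h⟩
    · exact ⟨2, by simp, h⟩
    · exact ⟨3, by simp, h⟩
  · rintro ⟨n, hn, h⟩
    fin_cases hn
    · exact Or.inl (Or.inl (Or.inr h))
    · exact Or.inl (Or.inr h)
    · exact Or.inr h

lemma pv_mem_present (words : List (List Char)) (ings : List String) (k : List (List Char)) :
    k ∈ pvPresent words ings ↔
      (∃ n ∈ ([1, 2, 3] : List Int), ∃ i : Int,
          (0 ≤ i ∧ i < PySem.List.len words - n + 1) ∧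
            k = PySem.List.slice words (some i) (some (i + n))) ∨
        ∃ s ∈ ings, ∃ w ∈ PySem.Chars.split₀ s.toList, k = [w] := by
  unfold pvPresent
  have h := pv_mem_foldl_foldl_add (κ := List (List Char)) ings
    (fun s => PySem.Chars.split₀ s.toList) (fun w => [w]) (pvGrams words) k
  rw [show (fun (st : PySem.Set (List (List Char))) (x : String) =>
        List.foldl (fun st y => PySem.Set.add st ((fun w => [w]) y)) st
          ((fun s => PySem.Chars.split₀ s.toList) x)) =
      (fun pr s => (PySem.Chars.split₀ s.toList).foldl (fun pr w => PySem.Set.add pr [w]) pr)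
    from rfl] at h
  rw [h, pv_mem_grams]

-- membership in hits
lemma pv_mem_hits (present : PySem.Set (List (List Char))) (e : String) :
    e ∈ pvHits present ↔ ∃ p ∈ pvInvItemsC, p.1 ∈ present ∧ e ∈ p.2 := by
  unfold pvHits
  rw [pvInverted_items_eq]
  have main : ∀ (l : List (List (List Char) × List String)) (s : PySem.Set String),
      (e ∈ l.foldl (fun h p => if PySem.Set.contains present p.1 then PySem.Set.update h p.2 else h) s) ↔
        e ∈ s ∨ ∃ p ∈ l, p.1 ∈ present ∧ e ∈ p.2 := by
    intro l
    induction l with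
    | nil => simp
    | cons a l ih =>
      intro s
      simp only [List.foldl_cons, ih, List.mem_cons]
      by_cases h : PySem.Set.contains present a.1
      · simp only [h, if_pos, PySem.Set.mem_update]
        have ha : a.1 ∈ present := (PySem.Set.contains_iff present a.1).mp h
        constructor
        · rintro ((h1 | h1) | h1)
          · exact Or.inl h1
          · exact Or.inr ⟨a, Or.inl rfl, ha, h1⟩
          · rcases h1 with ⟨p, hp, h2⟩; exact Or.inr ⟨p, Or.inr hp, h2⟩
        · rintro (h1 | ⟨p, hp | hp, h2⟩)
          · exact Or.inl (Or.inl h1)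
          · subst hp; exact Or.inl (Or.inr h2.2)
          · exact Or.inr ⟨p, hp, h2⟩
      · simp only [h, if_neg, Bool.not_eq_true]
        have ha : a.1 ∉ present := by
          intro hmem
          exact h ((PySem.Set.contains_iff present a.1).mpr hmem)
        constructor
        · rintro (h1 | h1)
          · exact Or.inl h1
          · rcases h1 with ⟨p, hp, h2⟩; exact Or.inr ⟨p, Or.inr hp, h2⟩
        · rintro (h1 | ⟨p, hp | hp, h2⟩)
          · exact Or.inl h1
          · subst hp; exact absurd h2.1 ha
          · exact Or.inr ⟨p, hp, h2⟩
  rw [main]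
  simp [PySem.Set.empty]

-- decidable facts about the literal tables
lemma pvD2 : ∀ q ∈ pvEquipmentDict, ∀ ph ∈ q.2, ∃ p ∈ pvInvItemsC,
    p.1 = PySem.Chars.split₀ ph.toList ∧ q.1 ∈ p.2 ∧ 1 ≤ p.1.length ∧ p.1.length ≤ 3 ∧
      (p.1 = [ph.toList] ∨ ph.toList.any PySem.Chars.isspace = true) ∧
      (p.1.length = 1 → p.1 = [ph.toList]) := by decide

lemma pvD1 : ∀ q ∈ pvEquipmentDict, ∀ p ∈ pvInvItemsC, q.1 ∈ p.2 → ∃ ph ∈ q.2,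
    PySem.Chars.split₀ ph.toList = p.1 ∧ (p.1.length = 1 → p.1 = [ph.toList]) := by decide

-- window slices of valid length have that length
lemma pv_slice_length (words : List (List Char)) (i n : Int) (h0 : 0 ≤ i)
    (h1 : i + n ≤ PySem.List.len words) (hn : 0 ≤ n) :
    (PySem.List.slice words (some i) (some (i + n))).length = n.toNat := by
  rw [PySem.List.slice_toNat words h0 (by omega)]
  rw [List.length_take, List.length_drop]
  rw [PySem.List.len_eq] at h1
  omega

-- the per-equipment condition agrees
lemma pv_key (q : String × List String) (hq : q ∈ pvEquipmentDict)
    (words : List (List Char)) (ings : List String) :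
    (q.2.any (fun phrase =>
        pvPhraseInStrList phrase.toList words || pvPhraseInIngredients phrase.toList ings)) =
      PySem.Set.contains (pvHits (pvPresent words ings)) q.1 := by
  rw [Bool.eq_iff_iff, List.any_eq_true, PySem.Set.contains_iff, pv_mem_hits]
  constructor
  · rintro ⟨ph, hph, hmatch⟩
    obtain ⟨p, hp, hsplit, hqin, hlen1, hlen3, hsp, hone⟩ := pvD2 q hq ph hph
    refine ⟨p, hp, ?_, hqin⟩
    rw [pv_mem_present]
    rcases Bool.or_eq_true _ _ |>.mp hmatch with hstr | hing
    · obtain ⟨i, ⟨h0, h1⟩, hsl⟩ := (pvPhraseInStrList_iff _ _).mp hstr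
      left
      refine ⟨PySem.List.len (PySem.Chars.split₀ ph.toList), ?_, i, ⟨h0, h1⟩, by rw [hsl, hsplit]⟩
      rw [PySem.List.len_eq, ← hsplit]
      interval_cases h : p.1.length <;> simp_all
    · obtain ⟨s, hs, hmem⟩ := (pvPhraseInIngredients_iff _ _).mp hing
      rcases hsp with hsing | hspace
      · exact Or.inr ⟨s, hs, ph.toList, hmem, hsing⟩
      · exfalso
        obtain ⟨c, hc, hcsp⟩ := List.any_eq_true.mp hspace
        exact absurd hcsp (by simp [pv_split₀_no_space s.toList ph.toList hmem c hc])
  · rintro ⟨p, hp, hpres, hqin⟩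
    obtain ⟨ph, hph, hsplit, hone⟩ := pvD1 q hq p hp hqin
    refine ⟨ph, hph, ?_⟩
    rw [Bool.or_eq_true]
    rw [pv_mem_present] at hpres
    rcases hpres with ⟨n, hn, i, ⟨h0, h1⟩, hk⟩ | ⟨s, hs, w, hw, hk⟩
    · left
      rw [pvPhraseInStrList_iff]
      have hnpos : (0:Int) < n := by fin_cases hn <;> norm_num
      have hlen : p.1.length = n.toNat := by
        rw [hk]; exact pv_slice_length words i n h0 (by omega) (by omega)
      have hLn : PySem.List.len (PySem.Chars.split₀ ph.toList) = n := by
        rw [PySem.List.len_eq, hsplit, hlen]; omega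
      exact ⟨i, ⟨h0, by rw [hLn]; exact h1⟩, by rw [hLn, ← hk, hsplit]⟩
    · right
      rw [pvPhraseInIngredients_iff]
      have h1 : p.1.length = 1 := by rw [hk]; rfl
      have := hone h1
      rw [hk] at this
      obtain hph_eq : w = ph.toList := by
        injection this.symm with h _; exact h.symm
      exact ⟨s, hs, by rw [← hph_eq]; exact hw⟩

-- ===== VERDICT (by name: the statement is the Claim_ definition above) =====
theorem equipment_set_spec : Claim_equal_equipment_set := by
  unfold Claim_equal_equipment_set
  intro method ings _
  unfold Spec_equipment_set equipment_set equipment_set_alt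
  rw [List.foldl_map, pvAltWords_eq]
  apply PySem.List.foldl_congr_mem
  intro st q hq
  rw [pv_key q hq (pvMethodWordsList method) ings]
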